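-- pv_equiv track=rewrite | github.com/Cinder871169/Python | Thuc Hanh/TH2/4.py | tplt
-- ===== SOURCE A (Python) =====
-- def dfs(g, v, vs):
--     vs[v] = True
--     for i in g[v]:
--         if not vs[i]:
--             dfs(g, i, vs)
--
-- def tplt(n, e, x):
--     g = [[] for _ in range(n + 1)]
--
--     for u, v in e:
--         g[u].append(v)
--         g[v].append(u)
--
--     vs = [False] * (n + 1)
--
--     dfs(g, x, vs)
--
--     res = [i for i in range(1, n + 1) if not vs[i]]
--
--     return res
-- ===== SOURCE B (Python) =====
-- def tplt(n, e, x):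
--     vs = [False] * (n + 1)
--     vs[x] = True
--
--     changed = True
--     while changed:
--         changed = False
--         for u, v in e:
--             if vs[u] != vs[v]:
--                 vs[u] = True
--                 vs[v] = True
--                 changed = True
--
--     return [i for i in range(1, n + 1) if not vs[i]]
-- ===== Notes on version B (the rewrite author's own statement) =====
-- stated objective: alternative
-- what changed: B builds no adjacency list and uses no recursion at all: it computes the set of vertices connected to x as the fixed point of repeated symmetric edge relaxation over a boolean visited vector (sweep the edge list, marking both endpoints whenever exactly one is marked, until a sweep changes nothing); the output depends only on which vertices are connected to x, so the returned list is identical.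
import Mathlib
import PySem

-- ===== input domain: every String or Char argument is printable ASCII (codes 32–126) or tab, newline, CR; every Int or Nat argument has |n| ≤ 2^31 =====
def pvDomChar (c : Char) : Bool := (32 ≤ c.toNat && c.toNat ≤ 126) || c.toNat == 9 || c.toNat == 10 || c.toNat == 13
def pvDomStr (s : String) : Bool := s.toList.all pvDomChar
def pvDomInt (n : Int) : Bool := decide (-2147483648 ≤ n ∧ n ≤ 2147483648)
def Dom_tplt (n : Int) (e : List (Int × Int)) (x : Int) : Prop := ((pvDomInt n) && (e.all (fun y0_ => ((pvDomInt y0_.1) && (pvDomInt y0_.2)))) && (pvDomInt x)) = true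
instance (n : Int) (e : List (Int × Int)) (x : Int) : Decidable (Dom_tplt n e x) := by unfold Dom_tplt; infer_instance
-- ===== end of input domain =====

-- B replaces A's adjacency-list construction plus recursive dfs by a recursion-free fixed-point
-- computation: sweep the raw edge list, marking both endpoints of an edge whenever exactly one is
-- marked, until a sweep changes nothing; same return value (the equivalence is about return values).

-- ===== PORT A =====
-- dfs(g, v, vs): recursion on an explicit fuel counter; the fuel is only a totality guard
-- (the recursion depth is bounded by the number of unvisited vertices, proved in the lemmas below).
def dfsA (g : List (List Int)) : Nat → Int → List Bool → List Bool
  | 0, _, vs => vs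
  | fuel + 1, v, vs =>
    (PySem.List.pyGetD g v []).foldl
      (fun acc i => if PySem.List.pyGetD acc i false then acc else dfsA g fuel i acc)
      (PySem.List.pySetD vs v true)

def tplt (n : Int) (e : List (Int × Int)) (x : Int) : List Int :=
  let g0 : List (List Int) := List.replicate (n + 1).toNat []
  let g := e.foldl (fun g uv =>
      let g1 := PySem.List.pySetD g uv.1 (PySem.List.pyGetD g uv.1 [] ++ [uv.2])
      PySem.List.pySetD g1 uv.2 (PySem.List.pyGetD g1 uv.2 [] ++ [uv.1])) g0
  let vs : List Bool := List.replicate (n + 1).toNat false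
  let vs := dfsA g (n + 1).toNat x vs
  (PySem.List.pyRange 1 (n + 1) 1).filter (fun i => ! PySem.List.pyGetD vs i false)

-- ===== PORT B =====
-- one sweep of the 'for u, v in e' loop; the state is (vs, changed)
def sweepB (e : List (Int × Int)) (s : List Bool × Bool) : List Bool × Bool :=
  e.foldl (fun s p =>
    if (PySem.List.pyGetD s.1 p.1 false) != (PySem.List.pyGetD s.1 p.2 false) then
      (PySem.List.pySetD (PySem.List.pySetD s.1 p.1 true) p.2 true, true)
    else s) s

-- the 'while changed' loop; fuel is only a totality guard (each continuing sweep marks a new vertex)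
def whileB (e : List (Int × Int)) : Nat → List Bool → List Bool
  | 0, vs => vs
  | fuel + 1, vs =>
    let s := sweepB e (vs, false)
    if s.2 then whileB e fuel s.1 else s.1

def tplt_alt (n : Int) (e : List (Int × Int)) (x : Int) : List Int :=
  let vs0 : List Bool := List.replicate (n + 1).toNat false
  let vs1 := PySem.List.pySetD vs0 x true
  let vs := whileB e ((n + 1).toNat + 1) vs1
  (PySem.List.pyRange 1 (n + 1) 1).filter (fun i => ! PySem.List.pyGetD vs i false)

-- ===== PRECONDITION & SPEC =====
-- Pre_: exactly the inputs on which A returns normally: the start vertex and all edge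
-- endpoints are valid Python indices into the n+1 lists (otherwise dfs/g[u] raises IndexError).
def Pre_tplt (n : Int) (e : List (Int × Int)) (x : Int) : Prop :=
  PySem.Raise.InRange (n + 1).toNat x ∧
  ∀ p ∈ e, PySem.Raise.InRange (n + 1).toNat p.1 ∧ PySem.Raise.InRange (n + 1).toNat p.2

instance (n : Int) (e : List (Int × Int)) (x : Int) : Decidable (Pre_tplt n e x) := by
  unfold Pre_tplt; infer_instance

def pvWitness_tplt : Int × (List (Int × Int)) × Int := (3, [(1, 2), (2, 3)], 1)

def Spec_tplt (n : Int) (e : List (Int × Int)) (x : Int) (out : List Int) : Prop := out = tplt_alt n e x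
instance (n : Int) (e : List (Int × Int)) (x : Int) (out : List Int) : Decidable (Spec_tplt n e x out) := by unfold Spec_tplt; infer_instance

-- ===== CLAIM (what is proved, stated in full; the proofs are below) =====
def Claim_equal_tplt : Prop := ∀ (n : Int) (e : List (Int × Int)) (x : Int), Dom_tplt n e x → Pre_tplt n e x → Spec_tplt n e x (tplt n e x)

-- ===== LEMMAS AND PROOFS =====

-- ---------- Python index normalisation ----------
def nrm (m : Nat) (i : Int) : Nat := (i % (m : Int)).toNat

theorem nrm_eq_of_nonneg {m : Nat} {i : Int} (h0 : 0 ≤ i) (h1 : i < (m : Int)) :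
    nrm m i = i.toNat := by
  unfold nrm
  rw [Int.emod_eq_of_lt h0 h1]

theorem nrm_eq_of_neg {m : Nat} {i : Int} (h0 : i < 0) (h1 : -(m : Int) ≤ i) :
    nrm m i = (i + m).toNat := by
  unfold nrm
  have : i % (m : Int) = (i + m) % m := by
    have := Int.add_mul_emod_self_left (a := i) (b := (m : Int)) (c := 1)
    simpa using this.symm
  rw [this, Int.emod_eq_of_lt (by omega) (by omega)]

theorem nrm_lt {m : Nat} {i : Int} (h : PySem.Raise.InRange m i) : nrm m i < m := by
  unfold PySem.Raise.InRange at h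
  rcases (by omega : 0 ≤ i ∨ i < 0) with h0 | h0
  · rw [nrm_eq_of_nonneg h0 h.2]; omega
  · rw [nrm_eq_of_neg h0 h.1]; omega

theorem pos_of_inRange {m : Nat} {i : Int} (h : PySem.Raise.InRange m i) : 0 < m := by
  unfold PySem.Raise.InRange at h
  omega

theorem pyIdx?_inRange {m : Nat} {i : Int} (h : PySem.Raise.InRange m i) :
    PySem.List.pyIdx? m i = some (nrm m i) := by
  unfold PySem.Raise.InRange at h
  unfold PySem.List.pyIdx?
  split_ifs with h1 h2 h3
  · rw [nrm_eq_of_nonneg h1 h2]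
  · omega
  · rw [nrm_eq_of_neg (by omega) h3]
    congr 1
    omega
  · omega

theorem pyGetD_nrm {α : Type} (vs : List α) (i : Int) (d : α)
    (h : PySem.Raise.InRange vs.length i) :
    PySem.List.pyGetD vs i d = vs.getD (nrm vs.length i) d := by
  unfold PySem.List.pyGetD PySem.List.pyGet?
  rw [pyIdx?_inRange h]
  have hlt : nrm vs.length i < vs.length := nrm_lt h
  simp [Option.bind, List.getD, List.getElem?_eq_getElem hlt]

theorem pySetD_nrm {α : Type} (vs : List α) (i : Int) (v : α)
    (h : PySem.Raise.InRange vs.length i) :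
    PySem.List.pySetD vs i v = vs.set (nrm vs.length i) v := by
  unfold PySem.List.pySetD PySem.List.pySet?
  rw [pyIdx?_inRange h]
  rfl

-- ---------- Nat-level state, adjacency, reachability ----------
def adjn (g : List (List Int)) (a : Nat) : List Nat := (g.getD a []).map (nrm g.length)

def dfsN (adj : Nat → List Nat) : Nat → Nat → List Bool → List Bool
  | 0, _, vs => vs
  | f + 1, v, vs =>
    (adj v).foldl (fun acc i => if acc.getD i false then acc else dfsN adj f i acc)
      (vs.set v true)

def vf (vs : List Bool) (u : Nat) : Bool := vs.getD u false

-- reachability avoiding already-visited vertices (every vertex entered must be unvisited)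
inductive Reach (adj : Nat → List Nat) (A : Nat → Bool) : Nat → Nat → Prop
  | refl (v : Nat) : Reach adj A v v
  | tail {v u w : Nat} : Reach adj A v u → w ∈ adj u → A w = false → Reach adj A v w

theorem reach_mono {adj : Nat → List Nat} {A B : Nat → Bool}
    (hAB : ∀ u, A u = true → B u = true) {v u : Nat} (h : Reach adj B v u) :
    Reach adj A v u := by
  induction h with
  | refl => exact Reach.refl _
  | tail _ hw hf ih =>
      exact Reach.tail ih hw (by cases hA : A _ <;> simp_all [hAB _])

theorem reach_trans {adj : Nat → List Nat} {A : Nat → Bool} {a b c : Nat}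
    (h1 : Reach adj A a b) (h2 : Reach adj A b c) : Reach adj A a c := by
  induction h2 with
  | refl => exact h1
  | tail _ hw hf ih => exact Reach.tail ih hw hf

theorem reach_false {adj : Nat → List Nat} {A : Nat → Bool} {v u : Nat}
    (hv : A v = false) (h : Reach adj A v u) : A u = false := by
  induction h with
  | refl => exact hv
  | tail _ _ hf _ => exact hf

theorem reach_lift {adj : Nat → List Nat} {A B : Nat → Bool} {i0 : Nat}
    (hAB : ∀ u, A u = true → B u = true)
    (hchar : ∀ u, B u = true → A u = true ∨ Reach adj A i0 u)
    {v u : Nat} (h : Reach adj A v u) :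
    Reach adj B v u ∨ Reach adj A i0 u := by
  induction h with
  | refl => exact Or.inl (Reach.refl _)
  | tail _ hw hf ih =>
      rcases ih with ih | ih
      · cases hBw : B _ with
        | false => exact Or.inl (Reach.tail ih hw hBw)
        | true =>
            rcases hchar _ hBw with h' | h'
            · rw [h'] at hf; cases hf
            · exact Or.inr h'
      · exact Or.inr (Reach.tail ih hw hf)

theorem reach_congr {adj adj' : Nat → List Nat} {A A' : Nat → Bool}
    (hadj : ∀ a w, w ∈ adj a ↔ w ∈ adj' a) (hA : ∀ u, A u = A' u)
    {v u : Nat} (h : Reach adj A v u) : Reach adj' A' v u := by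
  induction h with
  | refl => exact Reach.refl _
  | tail _ hw hf ih => exact Reach.tail ih ((hadj _ _).mp hw) ((hA _) ▸ hf)

-- ---------- counting ----------
theorem vf_set {vs : List Bool} {a : Nat} (ha : a < vs.length) (u : Nat) :
    vf (vs.set a true) u = if u = a then true else vf vs u := by
  unfold vf
  by_cases h : u = a
  · subst h
    simp [List.getD, List.getElem?_set_self, ha]
  · rw [if_neg h]
    have : (vs.set a true)[u]? = vs[u]? := List.getElem?_set_ne (fun hh => h hh.symm)
    simp [List.getD, this]

theorem vf_set_true (vs : List Bool) (a u : Nat) :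
    vf (vs.set a true) u = true ↔ ((u = a ∧ a < vs.length) ∨ vf vs u = true) := by
  by_cases ha : a < vs.length
  · rw [vf_set ha u]
    by_cases h : u = a
    · simp [h, ha]
    · simp [h]
  · rw [List.set_eq_of_length_le (by omega)]
    simp [ha]

def cF (vs : List Bool) : Nat :=
  ((List.range vs.length).filter (fun u => vf vs u = false)).length

theorem sum_filter_set (f : Nat → Nat) {vs : List Bool} {a : Nat}
    (ha : a < vs.length) (hva : vf vs a = false) :
    ∀ (l : List Nat), l.Nodup → a ∈ l →
      ((l.filter (fun u => vf vs u = false)).map f).sum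
        = f a + ((l.filter (fun u => vf (vs.set a true) u = false)).map f).sum := by
  intro l hnd hmem
  induction l with
  | nil => cases hmem
  | cons b l ih =>
      rcases List.nodup_cons.mp hnd with ⟨hbl, hnd'⟩
      have hcongr : a ∉ l → l.filter (fun u => vf (vs.set a true) u = false)
          = l.filter (fun u => vf vs u = false) := by
        intro hx
        apply List.filter_congr
        intro u hu
        have hu' : u ≠ a := fun h => hx (h ▸ hu)
        rw [vf_set ha u, if_neg hu']
      rcases List.mem_cons.mp hmem with hba | hal
      · subst hba
        have h1 : vf (vs.set a true) a = true := by rw [vf_set ha a, if_pos rfl]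
        rw [List.filter_cons, List.filter_cons, hcongr hbl]
        rw [if_pos (by simp [hva]), if_neg (by simp [h1])]
        simp
      · have hba : b ≠ a := fun h => hbl (h ▸ hal)
        have hb' : vf (vs.set a true) b = vf vs b := by rw [vf_set ha b, if_neg hba]
        rw [List.filter_cons, List.filter_cons, hb']
        cases hb : vf vs b with
        | false =>
            rw [if_pos (by simp [hb]), if_pos (by simp [hb])]
            simp only [List.map_cons, List.sum_cons, ih hnd' hal]
            omega
        | true =>
            rw [if_neg (by simp [hb]), if_neg (by simp [hb])]
            exact ih hnd' hal

theorem cF_set {vs : List Bool} {a : Nat} (ha : a < vs.length) (hva : vf vs a = false) :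
    cF vs = 1 + cF (vs.set a true) := by
  have h := sum_filter_set (fun _ => 1) ha hva (List.range vs.length)
    (List.nodup_range) (List.mem_range.mpr ha)
  unfold cF
  rw [List.length_set]
  calc ((List.range vs.length).filter (fun u => vf vs u = false)).length
      = (((List.range vs.length).filter (fun u => vf vs u = false)).map
          (fun _ => 1)).sum := by
        simp
    _ = 1 + (((List.range vs.length).filter
          (fun u => vf (vs.set a true) u = false)).map (fun _ => 1)).sum := h
    _ = 1 + ((List.range vs.length).filter
          (fun u => vf (vs.set a true) u = false)).length := by
        simp

theorem cF_le_of_pointwise {vs ws : List Bool} (hlen : ws.length = vs.length)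
    (h : ∀ u, vf vs u = true → vf ws u = true) : cF ws ≤ cF vs := by
  unfold cF
  rw [hlen]
  simp only [← List.countP_eq_length_filter]
  apply List.countP_mono_left
  intro u _
  simp only [decide_eq_true_eq]
  intro hw
  cases hv : vf vs u with
  | false => rfl
  | true => rw [h u hv] at hw; cases hw

theorem cF_pos {vs : List Bool} {v : Nat} (hv : v < vs.length) (hf : vf vs v = false) :
    1 ≤ cF vs := by
  unfold cF
  have : v ∈ (List.range vs.length).filter (fun u => vf vs u = false) :=
    List.mem_filter.mpr ⟨List.mem_range.mpr hv, by simp [hf]⟩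
  exact List.length_pos_of_mem this

-- ---------- A-side: fold-length and characterisation ----------
theorem foldl_length_inv {α : Type} {step : List α → Nat → List α}
    (h : ∀ acc i, (step acc i).length = acc.length) :
    ∀ (l : List Nat) (acc : List α), (l.foldl step acc).length = acc.length := by
  intro l
  induction l with
  | nil => intro acc; rfl
  | cons i l ih =>
      intro acc
      rw [List.foldl_cons, ih (step acc i), h acc i]

theorem dfsN_length (adj : Nat → List Nat) :
    ∀ (fuel : Nat) (v : Nat) (vs : List Bool), (dfsN adj fuel v vs).length = vs.length := by
  intro fuel
  induction fuel with
  | zero => intro v vs; rfl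
  | succ f ih =>
      intro v vs
      show ((adj v).foldl _ (vs.set v true)).length = vs.length
      rw [foldl_length_inv (step := fun acc i =>
          if acc.getD i false then acc else dfsN adj f i acc)
        (fun acc i => by simp only []; split <;> simp [ih])]
      exact List.length_set

theorem bool_false_of_not_true {b : Bool} (h : ¬ b = true) : b = false := by
  cases b
  · rfl
  · exact absurd rfl h

theorem mark_reach_lhs (adj : Nat → List Nat) {A B : Nat → Bool} {v : Nat}
    (hchar : ∀ u, B u = true ↔ (u = v ∨ A u = true)) (hAv : A v = false)
    (st : List Nat) :
    ∀ u, Reach adj A v u →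
      (B u = true ∨ ∃ i, (i ∈ adj v ∨ i ∈ st) ∧ B i = false ∧ Reach adj B i u) := by
  intro u h
  induction h with
  | refl => exact Or.inl ((hchar v).mpr (Or.inl rfl))
  | tail hr hw hf ih =>
      rename_i u0 w
      rcases ih with hB | ⟨i, hi, hBi, hri⟩
      · rcases (hchar u0).mp hB with rfl | hA
        · by_cases hBw : B w = true
          · exact Or.inl hBw
          · exact Or.inr ⟨w, Or.inl hw, bool_false_of_not_true hBw, Reach.refl w⟩
        · rw [reach_false hAv hr] at hA; cases hA
      · by_cases hBw : B w = true
        · exact Or.inl hBw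
        · exact Or.inr ⟨i, hi, hBi, Reach.tail hri hw (bool_false_of_not_true hBw)⟩

theorem absorb_mark_st (adj : Nat → List Nat) {A B : Nat → Bool} {v : Nat}
    (hchar : ∀ u, B u = true ↔ (u = v ∨ A u = true)) (hAv : A v = false)
    (st : List Nat) (u : Nat) :
    (B u = true ∨ ∃ i, (i ∈ adj v ∨ i ∈ st) ∧ B i = false ∧ Reach adj B i u)
    ↔ (A u = true ∨ ∃ i, (i = v ∨ i ∈ st) ∧ A i = false ∧ Reach adj A i u) := by
  have hmono : ∀ w, A w = true → B w = true := fun w hw => (hchar w).mpr (Or.inr hw)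
  have hAfalse : ∀ w, B w = false → A w = false := by
    intro w hw
    cases hA : A w
    · rfl
    · rw [hmono w hA] at hw; cases hw
  constructor
  · rintro (hB | ⟨i, hi, hBi, hr⟩)
    · rcases (hchar u).mp hB with rfl | hA
      · exact Or.inr ⟨u, Or.inl rfl, hAv, Reach.refl u⟩
      · exact Or.inl hA
    · have hAi : A i = false := hAfalse i hBi
      have hrA : Reach adj A i u := reach_mono hmono hr
      rcases hi with hi | hi
      · exact Or.inr ⟨v, Or.inl rfl, hAv,
          reach_trans (Reach.tail (Reach.refl v) hi hAi) hrA⟩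
      · exact Or.inr ⟨i, Or.inr hi, hAi, hrA⟩
  · rintro (hA | ⟨i, hi, hAi, hr⟩)
    · exact Or.inl (hmono u hA)
    · rcases hi with rfl | hi
      · exact mark_reach_lhs adj hchar hAv st u hr
      · rcases reach_lift (i0 := v) hmono
            (fun w hw => ((hchar w).mp hw).elim
              (fun h => Or.inr (by rw [h]; exact Reach.refl v)) Or.inl) hr with hrB | hrV
        · by_cases hBi : B i = true
          · rcases (hchar i).mp hBi with rfl | hA'
            · exact mark_reach_lhs adj hchar hAv st u hr
            · rw [hAi] at hA'; cases hA'
          · exact Or.inr ⟨i, Or.inr hi, bool_false_of_not_true hBi, hrB⟩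
        · exact mark_reach_lhs adj hchar hAv st u hrV

theorem absorb_fold (adj : Nat → List Nat) {A B : Nat → Bool} {i0 : Nat}
    (hchar : ∀ u, B u = true ↔ (A u = true ∨ Reach adj A i0 u))
    (hA0 : A i0 = false) (l : List Nat) (u : Nat) :
    (B u = true ∨ ∃ j ∈ l, B j = false ∧ Reach adj B j u)
    ↔ (A u = true ∨ ∃ j ∈ i0 :: l, A j = false ∧ Reach adj A j u) := by
  have hmono : ∀ w, A w = true → B w = true := fun w hw => (hchar w).mpr (Or.inl hw)
  have hAfalse : ∀ w, B w = false → A w = false := by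
    intro w hw
    cases hA : A w
    · rfl
    · rw [hmono w hA] at hw; cases hw
  constructor
  · rintro (hB | ⟨j, hj, hjB, hr⟩)
    · rcases (hchar u).mp hB with hA | hr
      · exact Or.inl hA
      · exact Or.inr ⟨i0, List.mem_cons_self, hA0, hr⟩
    · exact Or.inr ⟨j, List.mem_cons_of_mem _ hj, hAfalse j hjB, reach_mono hmono hr⟩
  · rintro (hA | ⟨j, hj, hjA, hr⟩)
    · exact Or.inl (hmono u hA)
    · rcases List.mem_cons.mp hj with rfl | hjl
      · exact Or.inl ((hchar u).mpr (Or.inr hr))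
      · rcases reach_lift (i0 := i0) hmono (fun w hw => (hchar w).mp hw) hr with
          hrB | hP
        · by_cases hBj : B j = true
          · rcases (hchar j).mp hBj with hA' | hrj
            · rw [hjA] at hA'; cases hA'
            · exact Or.inl ((hchar u).mpr (Or.inr (reach_trans hrj hr)))
          · exact Or.inr ⟨j, hjl, bool_false_of_not_true hBj, hrB⟩
        · exact Or.inl ((hchar u).mpr (Or.inr hP))

theorem foldN_char (adj : Nat → List Nat) (K f : Nat)
    (IH : ∀ (vs : List Bool) (v : Nat), cF vs ≤ K → cF vs ≤ f →
        (∀ a w, w ∈ adj a → w < vs.length) → v < vs.length → vf vs v = false →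
        (∀ u, vf (dfsN adj f v vs) u = true ↔
          (vf vs u = true ∨ Reach adj (vf vs) v u))) :
    ∀ (l : List Nat) (vs : List Bool),
      (∀ i ∈ l, i < vs.length) → cF vs ≤ K → cF vs ≤ f →
      (∀ a w, w ∈ adj a → w < vs.length) →
      ∀ u, vf (l.foldl (fun acc i => if acc.getD i false then acc
              else dfsN adj f i acc) vs) u = true ↔
        (vf vs u = true ∨ ∃ j ∈ l, vf vs j = false ∧ Reach adj (vf vs) j u) := by
  intro l
  induction l with
  | nil => intro vs _ _ _ _ u; simp
  | cons i l ihl =>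
      intro vs hl hK hf hadj u
      rw [List.foldl_cons]
      cases hvi : vf vs i with
      | true =>
          have hstep : (if vs.getD i false then vs else dfsN adj f i vs) = vs := by
            have : vs.getD i false = true := hvi
            rw [this]; rfl
          rw [hstep, ihl vs (fun j hj => hl j (List.mem_cons_of_mem _ hj)) hK hf hadj u]
          constructor
          · rintro (h | ⟨j, hj, hjf, hr⟩)
            · exact Or.inl h
            · exact Or.inr ⟨j, List.mem_cons_of_mem _ hj, hjf, hr⟩
          · rintro (h | ⟨j, hj, hjf, hr⟩)
            · exact Or.inl h
            · rcases List.mem_cons.mp hj with rfl | hjl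
              · rw [hvi] at hjf; cases hjf
              · exact Or.inr ⟨j, hjl, hjf, hr⟩
      | false =>
          have hstep : (if vs.getD i false then vs else dfsN adj f i vs)
              = dfsN adj f i vs := by
            have : vs.getD i false = false := hvi
            rw [this]; rfl
          rw [hstep]
          have hchar1 := IH vs i hK hf hadj (hl i List.mem_cons_self) hvi
          have hlen1 : (dfsN adj f i vs).length = vs.length := dfsN_length adj f i vs
          have hmono1 : ∀ w, vf vs w = true → vf (dfsN adj f i vs) w = true :=
            fun w hw => (hchar1 w).mpr (Or.inl hw)
          have hcf1 : cF (dfsN adj f i vs) ≤ cF vs := cF_le_of_pointwise hlen1 hmono1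
          rw [ihl (dfsN adj f i vs)
            (fun j hj => hlen1 ▸ hl j (List.mem_cons_of_mem _ hj))
            (le_trans hcf1 hK) (le_trans hcf1 hf)
            (fun a w hw => hlen1 ▸ hadj a w hw) u]
          exact absorb_fold adj hchar1 hvi l u

theorem dfsN_char (adj : Nat → List Nat) :
    ∀ (K : Nat) (vs : List Bool) (v fuel : Nat),
      cF vs ≤ K → cF vs ≤ fuel →
      (∀ a w, w ∈ adj a → w < vs.length) → v < vs.length → vf vs v = false →
      (∀ u, vf (dfsN adj fuel v vs) u = true ↔
        (vf vs u = true ∨ Reach adj (vf vs) v u)) := by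
  intro K
  induction K with
  | zero =>
      intro vs v fuel hK _ _ hv hvf
      have := cF_pos hv hvf
      omega
  | succ K ihK =>
      intro vs v fuel hK hfuel hadj hv hvf u
      have h1 : 1 ≤ cF vs := cF_pos hv hvf
      cases fuel with
      | zero => omega
      | succ f =>
          have hcfset : cF vs = 1 + cF (vs.set v true) := cF_set hv hvf
          have hsetchar : ∀ w, vf (vs.set v true) w = true ↔ (w = v ∨ vf vs w = true) := by
            intro w
            rw [vf_set hv w]
            by_cases h : w = v
            · simp [h]
            · simp [h]
          have hlenset : (vs.set v true).length = vs.length := List.length_set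
          show vf ((adj v).foldl (fun acc i => if acc.getD i false then acc
              else dfsN adj f i acc) (vs.set v true)) u = true ↔ _
          rw [foldN_char adj K f
            (fun vs' v' hK' hf' hadj' hv' hvf' => ihK vs' v' f hK' hf' hadj' hv' hvf')
            (adj v) (vs.set v true)
            (fun j hj => hlenset ▸ hadj v j hj)
            (by omega) (by omega)
            (fun a w hw => hlenset ▸ hadj a w hw) u]
          have := absorb_mark_st adj (B := vf (vs.set v true)) (A := vf vs) (v := v)
            hsetchar hvf [] u
          constructor
          · rintro (h | ⟨j, hj, hjf, hr⟩)
            · rcases (this.mp (Or.inl h)) with h' | ⟨i, hi, hif, hri⟩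
              · exact Or.inl h'
              · rcases hi with rfl | hi
                · exact Or.inr hri
                · cases hi
            · rcases (this.mp (Or.inr ⟨j, Or.inl hj, hjf, hr⟩)) with h' | ⟨i, hi, hif, hri⟩
              · exact Or.inl h'
              · rcases hi with rfl | hi
                · exact Or.inr hri
                · cases hi
          · rintro (h | hr)
            · rcases (this.mpr (Or.inl h)) with h' | ⟨i, hi, hif, hri⟩
              · exact Or.inl h'
              · rcases hi with hi | hi
                · exact Or.inr ⟨i, hi, hif, hri⟩
                · cases hi
            · rcases (this.mpr (Or.inr ⟨v, Or.inl rfl, hvf, hr⟩)) with h' | ⟨i, hi, hif, hri⟩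
              · exact Or.inl h'
              · rcases hi with hi | hi
                · exact Or.inr ⟨i, hi, hif, hri⟩
                · cases hi

-- ---------- A port = Nat version ----------
theorem dfsA_eq (g : List (List Int))
    (hg : ∀ l ∈ g, ∀ i ∈ l, PySem.Raise.InRange g.length i) :
    ∀ (fuel : Nat) (v : Int) (vs : List Bool),
      vs.length = g.length → PySem.Raise.InRange g.length v →
      dfsA g fuel v vs = dfsN (adjn g) fuel (nrm g.length v) vs := by
  intro fuel
  induction fuel with
  | zero => intro v vs _ _; rfl
  | succ f ihf =>
      intro v vs hlen hv
      have hnv : nrm g.length v < g.length := nrm_lt hv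
      have hset : PySem.List.pySetD vs v true = vs.set (nrm g.length v) true := by
        have := pySetD_nrm vs v true (by rw [hlen]; exact hv)
        rw [this, hlen]
      have hgv : PySem.List.pyGetD g v [] = g.getD (nrm g.length v) [] :=
        pyGetD_nrm g v [] hv
      have hmem : g.getD (nrm g.length v) [] ∈ g := by
        rw [List.getD_eq_getElem?_getD, List.getElem?_eq_getElem hnv]
        exact List.getElem_mem hnv
      have haux : ∀ (l : List Int) (acc : List Bool),
          (∀ i ∈ l, PySem.Raise.InRange g.length i) → acc.length = g.length →
          l.foldl (fun acc i => if PySem.List.pyGetD acc i false then acc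
              else dfsA g f i acc) acc
          = (l.map (nrm g.length)).foldl (fun acc i => if acc.getD i false then acc
              else dfsN (adjn g) f i acc) acc := by
        intro l
        induction l with
        | nil => intro acc _ _; rfl
        | cons i l ihl =>
            intro acc hli hacc
            have hi : PySem.Raise.InRange g.length i := hli i List.mem_cons_self
            rw [List.map_cons, List.foldl_cons, List.foldl_cons]
            have h1 : PySem.List.pyGetD acc i false
                = acc.getD (nrm g.length i) false := by
              have := pyGetD_nrm acc i false (by rw [hacc]; exact hi)
              rw [this, hacc]
            rw [h1]
            by_cases h2 : acc.getD (nrm g.length i) false = true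
            · rw [if_pos h2, if_pos h2]
              exact ihl acc (fun j hj => hli j (List.mem_cons_of_mem _ hj)) hacc
            · rw [if_neg h2, if_neg h2, ihf i acc hacc hi]
              exact ihl _ (fun j hj => hli j (List.mem_cons_of_mem _ hj))
                (by rw [dfsN_length]; exact hacc)
      show (PySem.List.pyGetD g v []).foldl _ (PySem.List.pySetD vs v true) = _
      rw [hset, hgv]
      rw [haux (g.getD (nrm g.length v) []) (vs.set (nrm g.length v) true)
        (fun i hi => hg _ hmem i hi) (by rw [List.length_set, hlen])]
      rfl

-- ---------- the adjacency construction: invariants and membership ----------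
theorem stepg_eq (m : Nat) (g' : List (List Int)) (a : Int) (b : Int)
    (hlen : g'.length = m) (ha : PySem.Raise.InRange m a) :
    PySem.List.pySetD g' a (PySem.List.pyGetD g' a [] ++ [b])
      = g'.set (nrm m a) (g'.getD (nrm m a) [] ++ [b]) := by
  have h1 := pySetD_nrm g' a (PySem.List.pyGetD g' a [] ++ [b]) (by rw [hlen]; exact ha)
  have h2 := pyGetD_nrm g' a ([] : List Int) (by rw [hlen]; exact ha)
  rw [h1, h2, hlen]

theorem build_inv (m : Nat) :
    ∀ (e : List (Int × Int)) (g : List (List Int)),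
      g.length = m →
      (∀ p ∈ e, PySem.Raise.InRange m p.1 ∧ PySem.Raise.InRange m p.2) →
      (∀ l ∈ g, ∀ i ∈ l, PySem.Raise.InRange m i) →
      (e.foldl (fun g uv =>
          let g1 := PySem.List.pySetD g uv.1 (PySem.List.pyGetD g uv.1 [] ++ [uv.2])
          PySem.List.pySetD g1 uv.2 (PySem.List.pyGetD g1 uv.2 [] ++ [uv.1])) g).length = m ∧
      (∀ l ∈ (e.foldl (fun g uv =>
          let g1 := PySem.List.pySetD g uv.1 (PySem.List.pyGetD g uv.1 [] ++ [uv.2])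
          PySem.List.pySetD g1 uv.2 (PySem.List.pyGetD g1 uv.2 [] ++ [uv.1])) g),
        ∀ i ∈ l, PySem.Raise.InRange m i) := by
  intro e
  induction e with
  | nil => intro g hlen _ hg; exact ⟨hlen, hg⟩
  | cons p e ihe =>
      intro g hlen hpe hg
      rcases hpe p List.mem_cons_self with ⟨hp1, hp2⟩
      have step : ∀ (g' : List (List Int)) (a b : Int), g'.length = m →
          PySem.Raise.InRange m a → PySem.Raise.InRange m b →
          (∀ l ∈ g', ∀ i ∈ l, PySem.Raise.InRange m i) →
          (PySem.List.pySetD g' a (PySem.List.pyGetD g' a [] ++ [b])).length = m ∧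
          (∀ l ∈ PySem.List.pySetD g' a (PySem.List.pyGetD g' a [] ++ [b]),
            ∀ i ∈ l, PySem.Raise.InRange m i) := by
        intro g' a b hlen' ha hb hg'
        have hseta := stepg_eq m g' a b hlen' ha
        have hmema : g'.getD (nrm m a) [] ∈ g' := by
          have hna : nrm m a < g'.length := by rw [hlen']; exact nrm_lt ha
          rw [List.getD_eq_getElem?_getD, List.getElem?_eq_getElem hna]
          exact List.getElem_mem hna
        constructor
        · rw [hseta, List.length_set, hlen']
        · rw [hseta]
          intro l hl i hi
          rcases List.mem_or_eq_of_mem_set hl with hl' | rfl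
          · exact hg' l hl' i hi
          · rcases List.mem_append.mp hi with hi' | hi'
            · exact hg' _ hmema i hi'
            · rw [List.mem_singleton.mp hi']
              exact hb
      have s1 := step g p.1 p.2 hlen hp1 hp2 hg
      have s2 := step _ p.2 p.1 s1.1 hp2 hp1 s1.2
      rw [List.foldl_cons]
      exact ihe _ s2.1 (fun q hq => hpe q (List.mem_cons_of_mem _ hq)) s2.2

theorem mem_getD_set (g : List (List Int)) (j : Nat) (hj : j < g.length)
    (l : List Int) (a : Nat) (i : Int) :
    i ∈ (g.set j l).getD a [] ↔ (if a = j then i ∈ l else i ∈ g.getD a []) := by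
  by_cases h : a = j
  · subst h
    rw [if_pos rfl, List.getD_eq_getElem?_getD, List.getElem?_set_self (by omega)]
    rfl
  · rw [if_neg h, List.getD_eq_getElem?_getD, List.getElem?_set_ne (fun hh => h hh.symm),
      List.getD_eq_getElem?_getD]

theorem build_mem (m : Nat) :
    ∀ (e : List (Int × Int)) (g : List (List Int)),
      g.length = m →
      (∀ p ∈ e, PySem.Raise.InRange m p.1 ∧ PySem.Raise.InRange m p.2) →
      ∀ (a : Nat) (i : Int),
        (i ∈ (e.foldl (fun g uv =>
            let g1 := PySem.List.pySetD g uv.1 (PySem.List.pyGetD g uv.1 [] ++ [uv.2])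
            PySem.List.pySetD g1 uv.2 (PySem.List.pyGetD g1 uv.2 [] ++ [uv.1])) g).getD a []
          ↔ (i ∈ g.getD a [] ∨
              ∃ p ∈ e, (nrm m p.1 = a ∧ i = p.2) ∨ (nrm m p.2 = a ∧ i = p.1))) := by
  intro e
  induction e with
  | nil =>
      intro g _ _ a i
      simp
  | cons p e ihe =>
      intro g hlen hpe a i
      rcases hpe p List.mem_cons_self with ⟨hp1, hp2⟩
      rw [List.foldl_cons]
      have h1 := stepg_eq m g p.1 p.2 hlen hp1
      set g1 := PySem.List.pySetD g p.1 (PySem.List.pyGetD g p.1 [] ++ [p.2]) with hg1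
      have hlen1 : g1.length = m := by rw [h1, List.length_set, hlen]
      have h2 := stepg_eq m g1 p.2 p.1 hlen1 hp2
      set g2 := PySem.List.pySetD g1 p.2 (PySem.List.pyGetD g1 p.2 [] ++ [p.1]) with hg2
      have hlen2 : g2.length = m := by rw [h2, List.length_set, hlen1]
      have hmem2 : ∀ (a : Nat) (i : Int),
          i ∈ g2.getD a [] ↔ (i ∈ g.getD a [] ∨
            (nrm m p.1 = a ∧ i = p.2) ∨ (nrm m p.2 = a ∧ i = p.1)) := by
        intro a i
        have m1 : ∀ (a : Nat) (i : Int), i ∈ g1.getD a [] ↔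
            (i ∈ g.getD a [] ∨ (nrm m p.1 = a ∧ i = p.2)) := by
          intro a i
          rw [h1, mem_getD_set g (nrm m p.1) (by rw [hlen]; exact nrm_lt hp1)]
          by_cases h : a = nrm m p.1
          · subst h
            simp [List.mem_append, eq_comm]
          · rw [if_neg h]
            constructor
            · exact Or.inl
            · rintro (h' | ⟨h1', _⟩)
              · exact h'
              · exact absurd h1'.symm h
        rw [h2, mem_getD_set g1 (nrm m p.2) (by rw [hlen1]; exact nrm_lt hp2)]
        by_cases h : a = nrm m p.2
        · subst h
          rw [if_pos rfl]
          rw [List.mem_append, List.mem_singleton, m1]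
          constructor
          · rintro ((h' | ⟨h1', h2'⟩) | h')
            · exact Or.inl h'
            · exact Or.inr (Or.inl ⟨h1', h2'⟩)
            · exact Or.inr (Or.inr ⟨rfl, h'⟩)
          · rintro (h' | (⟨h1', h2'⟩ | ⟨h1', h2'⟩))
            · exact Or.inl (Or.inl h')
            · exact Or.inl (Or.inr ⟨h1', h2'⟩)
            · exact Or.inr h2'
        · rw [if_neg h, m1]
          constructor
          · rintro (h' | h')
            · exact Or.inl h'
            · exact Or.inr (Or.inl h')
          · rintro (h' | (h' | ⟨h1', _⟩))
            · exact Or.inl h'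
            · exact Or.inr h'
            · exact absurd h1' (fun hh => h hh.symm)
      rw [ihe g2 hlen2 (fun q hq => hpe q (List.mem_cons_of_mem _ hq)) a i]
      constructor
      · rintro (h' | ⟨q, hq, hor⟩)
        · rcases (hmem2 a i).mp h' with h'' | h''
          · exact Or.inl h''
          · exact Or.inr ⟨p, List.mem_cons_self, h''⟩
        · exact Or.inr ⟨q, List.mem_cons_of_mem _ hq, hor⟩
      · rintro (h' | ⟨q, hq, hor⟩)
        · exact Or.inl ((hmem2 a i).mpr (Or.inl h'))
        · rcases List.mem_cons.mp hq with rfl | hq'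
          · exact Or.inl ((hmem2 a i).mpr (Or.inr hor))
          · exact Or.inr ⟨q, hq', hor⟩

-- ---------- B-side: Nat-level sweep / while, and their characterisation ----------
def eNorm (m : Nat) (e : List (Int × Int)) : List (Nat × Nat) :=
  e.map (fun p => (nrm m p.1, nrm m p.2))

def adjR (eN : List (Nat × Nat)) (a : Nat) : List Nat :=
  (eN.filter (fun p => p.1 = a)).map Prod.snd ++ (eN.filter (fun p => p.2 = a)).map Prod.fst

theorem mem_adjR (eN : List (Nat × Nat)) (a w : Nat) :
    w ∈ adjR eN a ↔ ∃ p ∈ eN, (p.1 = a ∧ p.2 = w) ∨ (p.2 = a ∧ p.1 = w) := by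
  unfold adjR
  simp only [List.mem_append, List.mem_map, List.mem_filter]
  constructor
  · rintro (⟨p, ⟨hp, h1⟩, h2⟩ | ⟨p, ⟨hp, h1⟩, h2⟩)
    · exact ⟨p, hp, Or.inl ⟨by simpa using h1, h2⟩⟩
    · exact ⟨p, hp, Or.inr ⟨by simpa using h1, h2⟩⟩
  · rintro ⟨p, hp, ⟨h1, h2⟩ | ⟨h1, h2⟩⟩
    · exact Or.inl ⟨p, ⟨hp, by simpa using h1⟩, h2⟩
    · exact Or.inr ⟨p, ⟨hp, by simpa using h1⟩, h2⟩

def sweepN (eN : List (Nat × Nat)) (s : List Bool × Bool) : List Bool × Bool :=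
  eN.foldl (fun s p =>
    if (s.1.getD p.1 false) != (s.1.getD p.2 false) then
      ((s.1.set p.1 true).set p.2 true, true)
    else s) s

def whileN (eN : List (Nat × Nat)) : Nat → List Bool → List Bool
  | 0, vs => vs
  | fuel + 1, vs =>
    let s := sweepN eN (vs, false)
    if s.2 then whileN eN fuel s.1 else s.1

theorem sweepN_length (eN : List (Nat × Nat)) :
    ∀ (s : List Bool × Bool), (sweepN eN s).1.length = s.1.length := by
  induction eN with
  | nil => intro s; rfl
  | cons p eN ih =>
      intro s
      show (sweepN eN _).1.length = _
      rw [ih]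
      by_cases h : (s.1.getD p.1 false) != (s.1.getD p.2 false)
      · simp only [h, if_pos]
        simp
      · simp only [h, if_neg]
        simp_all

theorem sweepN_mono (eN : List (Nat × Nat)) :
    ∀ (s : List Bool × Bool) (u : Nat), vf s.1 u = true → vf (sweepN eN s).1 u = true := by
  induction eN with
  | nil => intro s u h; exact h
  | cons p eN ih =>
      intro s u h
      show vf (sweepN eN _).1 u = true
      by_cases hc : (s.1.getD p.1 false) != (s.1.getD p.2 false)
      · simp only [hc, if_pos]
        exact ih _ u ((vf_set_true _ _ _).mpr (Or.inr ((vf_set_true _ _ _).mpr (Or.inr h))))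
      · simp only [hc]
        simp only [Bool.not_eq_true] at hc
        rw [if_neg (by simp [hc])]
        exact ih s u h

theorem sweepN_ch_mono (eN : List (Nat × Nat)) :
    ∀ (s : List Bool × Bool), s.2 = true → (sweepN eN s).2 = true := by
  induction eN with
  | nil => intro s h; exact h
  | cons p eN ih =>
      intro s h
      show (sweepN eN _).2 = true
      by_cases hc : (s.1.getD p.1 false) != (s.1.getD p.2 false)
      · simp only [hc, if_pos]
        exact ih _ rfl
      · simp only [hc]
        simp only [Bool.not_eq_true] at hc
        rw [if_neg (by simp [hc])]
        exact ih s h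

theorem sweepN_sound (eN0 : List (Nat × Nat)) :
    ∀ (eN : List (Nat × Nat)), (∀ p ∈ eN, p ∈ eN0) →
      ∀ (s : List Bool × Bool) (u : Nat), vf (sweepN eN s).1 u = true →
        vf s.1 u = true ∨ ∃ j, vf s.1 j = true ∧ Reach (adjR eN0) (fun _ => false) j u := by
  intro eN
  induction eN with
  | nil => intro _ s u h; exact Or.inl h
  | cons p eN ih =>
      intro hsub s u h
      have hp0 : p ∈ eN0 := hsub p List.mem_cons_self
      by_cases hc : (s.1.getD p.1 false) != (s.1.getD p.2 false)
      · have hstep : sweepN (p :: eN) s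
            = sweepN eN ((s.1.set p.1 true).set p.2 true, true) := by
          show (List.foldl _ _ _) = _
          rw [List.foldl_cons, if_pos hc]
          rfl
        rw [hstep] at h
        have hne : vf s.1 p.1 ≠ vf s.1 p.2 := by
          intro hh
          rw [bne_iff_ne] at hc
          exact hc hh
        have hones : ∀ j, vf ((s.1.set p.1 true).set p.2 true) j = true →
            ∃ j', vf s.1 j' = true ∧ Reach (adjR eN0) (fun _ => false) j' j := by
          intro j hj
          rcases (vf_set_true _ _ _).mp hj with ⟨rfl, _⟩ | hj'
          · -- j = p.2
            cases h1 : vf s.1 p.2 with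
            | true => exact ⟨p.2, h1, Reach.refl _⟩
            | false =>
                have h2 : vf s.1 p.1 = true := by
                  cases h2 : vf s.1 p.1
                  · rw [h1, h2] at hne; exact absurd rfl hne
                  · rfl
                exact ⟨p.1, h2, Reach.tail (Reach.refl _)
                  ((mem_adjR eN0 p.1 p.2).mpr ⟨p, hp0, Or.inl ⟨rfl, rfl⟩⟩) rfl⟩
          · rcases (vf_set_true _ _ _).mp hj' with ⟨rfl, _⟩ | hj''
            · -- j = p.1
              cases h1 : vf s.1 p.1 with
              | true => exact ⟨p.1, h1, Reach.refl _⟩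
              | false =>
                  have h2 : vf s.1 p.2 = true := by
                    cases h2 : vf s.1 p.2
                    · rw [h1, h2] at hne; exact absurd rfl hne
                    · rfl
                  exact ⟨p.2, h2, Reach.tail (Reach.refl _)
                    ((mem_adjR eN0 p.2 p.1).mpr ⟨p, hp0, Or.inr ⟨rfl, rfl⟩⟩) rfl⟩
            · exact ⟨j, hj'', Reach.refl _⟩
        rcases ih (fun q hq => hsub q (List.mem_cons_of_mem _ hq))
            ((s.1.set p.1 true).set p.2 true, true) u h with h' | ⟨j, hj, hr⟩
        · rcases hones u h' with ⟨j', hj', hr'⟩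
          exact Or.inr ⟨j', hj', hr'⟩
        · rcases hones j hj with ⟨j', hj', hr'⟩
          exact Or.inr ⟨j', hj', reach_trans hr' hr⟩
      · have hstep : sweepN (p :: eN) s = sweepN eN s := by
          show (List.foldl _ _ _) = _
          rw [List.foldl_cons, if_neg hc]
          rfl
        rw [hstep] at h
        exact ih (fun q hq => hsub q (List.mem_cons_of_mem _ hq)) s u h

theorem sweepN_nochange (eN : List (Nat × Nat)) :
    ∀ (s : List Bool × Bool), (sweepN eN s).2 = false →
      sweepN eN s = s ∧ ∀ p ∈ eN, vf s.1 p.1 = vf s.1 p.2 := by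
  induction eN with
  | nil => intro s h; exact ⟨rfl, by intro p hp; cases hp⟩
  | cons p eN ih =>
      intro s h
      by_cases hc : (s.1.getD p.1 false) != (s.1.getD p.2 false)
      · exfalso
        have hstep : sweepN (p :: eN) s
            = sweepN eN ((s.1.set p.1 true).set p.2 true, true) := by
          show (List.foldl _ _ _) = _
          rw [List.foldl_cons, if_pos hc]
          rfl
        rw [hstep] at h
        rw [sweepN_ch_mono eN _ rfl] at h
        cases h
      · have hstep : sweepN (p :: eN) s = sweepN eN s := by
          show (List.foldl _ _ _) = _
          rw [List.foldl_cons, if_neg hc]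
          rfl
        rw [hstep] at h
        rcases ih s h with ⟨h1, h2⟩
        refine ⟨by rw [hstep, h1], ?_⟩
        intro q hq
        rcases List.mem_cons.mp hq with rfl | hq'
        · rw [bne_iff_ne] at hc
          simpa [vf] using not_not.mp hc
        · exact h2 q hq'

theorem sweepN_cF_le (eN : List (Nat × Nat)) (s : List Bool × Bool) :
    cF (sweepN eN s).1 ≤ cF s.1 :=
  cF_le_of_pointwise (sweepN_length eN s) (sweepN_mono eN s)

theorem sweepN_dec (eN0 : List (Nat × Nat)) :
    ∀ (eN : List (Nat × Nat)) (s : List Bool × Bool),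
      (∀ p ∈ eN, p.1 < s.1.length ∧ p.2 < s.1.length) →
      (sweepN eN s).2 = true → s.2 = true ∨ cF (sweepN eN s).1 < cF s.1 := by
  intro eN
  induction eN with
  | nil => intro s _ h; exact Or.inl h
  | cons p eN ih =>
      intro s hE h
      rcases hE p List.mem_cons_self with ⟨hp1, hp2⟩
      by_cases hc : (s.1.getD p.1 false) != (s.1.getD p.2 false)
      · have hstep : sweepN (p :: eN) s
            = sweepN eN ((s.1.set p.1 true).set p.2 true, true) := by
          show (List.foldl _ _ _) = _
          rw [List.foldl_cons, if_pos hc]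
          rfl
        rw [hstep]
        right
        have hlt : cF ((s.1.set p.1 true).set p.2 true) < cF s.1 := by
          rw [bne_iff_ne] at hc
          have hvv : vf s.1 p.1 ≠ vf s.1 p.2 := hc
          cases h1 : vf s.1 p.1 with
          | false =>
              have : cF s.1 = 1 + cF (s.1.set p.1 true) := cF_set hp1 h1
              have h2 : cF ((s.1.set p.1 true).set p.2 true) ≤ cF (s.1.set p.1 true) :=
                cF_le_of_pointwise List.length_set
                  (fun u hu => (vf_set_true _ _ _).mpr (Or.inr hu))
              omega
          | true =>
              have h2 : vf s.1 p.2 = false := by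
                cases h2 : vf s.1 p.2
                · rfl
                · rw [h1, h2] at hvv; exact absurd rfl hvv
              have h2' : vf (s.1.set p.1 true) p.2 = false := by
                rw [vf_set hp1]
                split_ifs with hh
                · rw [hh, h1] at h2
                  exact absurd h2 (by decide)
                · exact h2
              have hset : cF (s.1.set p.1 true) = 1 + cF ((s.1.set p.1 true).set p.2 true) :=
                cF_set (by rw [List.length_set]; exact hp2) h2'
              have h3 : cF (s.1.set p.1 true) ≤ cF s.1 :=
                cF_le_of_pointwise List.length_set
                  (fun u hu => (vf_set_true _ _ _).mpr (Or.inr hu))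
              omega
        calc cF (sweepN eN ((s.1.set p.1 true).set p.2 true, true)).1
            ≤ cF ((s.1.set p.1 true).set p.2 true) := sweepN_cF_le eN _
          _ < cF s.1 := hlt
      · have hstep : sweepN (p :: eN) s = sweepN eN s := by
          show (List.foldl _ _ _) = _
          rw [List.foldl_cons, if_neg hc]
          rfl
        rw [hstep] at h ⊢
        exact ih s (fun q hq => hE q (List.mem_cons_of_mem _ hq)) h

theorem reach_closed (eN : List (Nat × Nat)) (vs : List Bool)
    (hcl : ∀ p ∈ eN, vf vs p.1 = vf vs p.2) :
    ∀ j u, Reach (adjR eN) (fun _ => false) j u → vf vs j = true → vf vs u = true := by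
  intro j u h
  induction h with
  | refl => intro h; exact h
  | tail _ hw _ ih =>
      intro hj
      rcases (mem_adjR eN _ _).mp hw with ⟨p, hp, ⟨h1, h2⟩ | ⟨h1, h2⟩⟩
      · rw [← h2, ← hcl p hp, h1]
        exact ih hj
      · rw [← h2, hcl p hp, h1]
        exact ih hj

theorem whileN_char (eN : List (Nat × Nat)) :
    ∀ (fuel : Nat) (vs : List Bool),
      (∀ p ∈ eN, p.1 < vs.length ∧ p.2 < vs.length) →
      cF vs < fuel →
      ∀ u, vf (whileN eN fuel vs) u = true ↔
        ∃ j, vf vs j = true ∧ Reach (adjR eN) (fun _ => false) j u := by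
  intro fuel
  induction fuel with
  | zero => intro vs _ h; omega
  | succ f ihf =>
      intro vs hE hfuel u
      show vf (if (sweepN eN (vs, false)).2 then whileN eN f (sweepN eN (vs, false)).1
          else (sweepN eN (vs, false)).1) u = true ↔ _
      cases hch : (sweepN eN (vs, false)).2 with
      | false =>
          rw [if_neg (by simp [hch])]
          rcases sweepN_nochange eN (vs, false) hch with ⟨heq, hcl⟩
          rw [heq]
          constructor
          · intro h
            exact ⟨u, h, Reach.refl _⟩
          · rintro ⟨j, hj, hr⟩
            exact reach_closed eN vs hcl j u hr hj
      | true =>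
          rw [if_pos (by simp [hch])]
          have hdec : cF (sweepN eN (vs, false)).1 < cF vs := by
            rcases sweepN_dec eN eN (vs, false) hE hch with h | h
            · cases h
            · exact h
          have hlen : (sweepN eN (vs, false)).1.length = vs.length :=
            sweepN_length eN (vs, false)
          rw [ihf (sweepN eN (vs, false)).1
            (fun p hp => by rw [hlen]; exact hE p hp) (by omega) u]
          constructor
          · rintro ⟨j, hj, hr⟩
            rcases sweepN_sound eN eN (fun q hq => hq) (vs, false) j hj with h' | ⟨i, hi, hri⟩
            · exact ⟨j, h', hr⟩
            · exact ⟨i, hi, reach_trans hri hr⟩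
          · rintro ⟨j, hj, hr⟩
            exact ⟨j, sweepN_mono eN (vs, false) j hj, hr⟩

-- ---------- B port = Nat version ----------
theorem sweepB_eq (m : Nat) (e : List (Int × Int))
    (he : ∀ p ∈ e, PySem.Raise.InRange m p.1 ∧ PySem.Raise.InRange m p.2) :
    ∀ (s : List Bool × Bool), s.1.length = m →
      sweepB e s = sweepN (eNorm m e) s := by
  induction e with
  | nil => intro s _; rfl
  | cons p e ih =>
      intro s hlen
      rcases he p List.mem_cons_self with ⟨hp1, hp2⟩
      have h1 : PySem.List.pyGetD s.1 p.1 false = s.1.getD (nrm m p.1) false := by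
        have := pyGetD_nrm s.1 p.1 false (by rw [hlen]; exact hp1)
        rw [this, hlen]
      have h2 : PySem.List.pyGetD s.1 p.2 false = s.1.getD (nrm m p.2) false := by
        have := pyGetD_nrm s.1 p.2 false (by rw [hlen]; exact hp2)
        rw [this, hlen]
      have hstepB : sweepB (p :: e) s = sweepB e
          (if (PySem.List.pyGetD s.1 p.1 false) != (PySem.List.pyGetD s.1 p.2 false) then
            (PySem.List.pySetD (PySem.List.pySetD s.1 p.1 true) p.2 true, true)
          else s) := by
        show (List.foldl _ _ _) = _
        rw [List.foldl_cons]
        rfl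
      have hstepN : sweepN (eNorm m (p :: e)) s = sweepN (eNorm m e)
          (if (s.1.getD (nrm m p.1) false) != (s.1.getD (nrm m p.2) false) then
            ((s.1.set (nrm m p.1) true).set (nrm m p.2) true, true)
          else s) := by
        show (List.foldl _ _ _) = _
        rw [show eNorm m (p :: e) = (nrm m p.1, nrm m p.2) :: eNorm m e from rfl,
          List.foldl_cons]
        rfl
      rw [hstepB, hstepN, h1, h2]
      by_cases hc : (s.1.getD (nrm m p.1) false) != (s.1.getD (nrm m p.2) false)
      · rw [if_pos hc, if_pos hc]
        have hs1 : PySem.List.pySetD s.1 p.1 true = s.1.set (nrm m p.1) true := by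
          have := pySetD_nrm s.1 p.1 true (by rw [hlen]; exact hp1)
          rw [this, hlen]
        have hs2 : PySem.List.pySetD (s.1.set (nrm m p.1) true) p.2 true
            = (s.1.set (nrm m p.1) true).set (nrm m p.2) true := by
          have := pySetD_nrm (s.1.set (nrm m p.1) true) p.2 true
            (by rw [List.length_set, hlen]; exact hp2)
          rw [this, List.length_set, hlen]
        rw [hs1, hs2]
        exact ih (fun q hq => he q (List.mem_cons_of_mem _ hq)) _
          (by simp [hlen])
      · rw [if_neg hc, if_neg hc]
        exact ih (fun q hq => he q (List.mem_cons_of_mem _ hq)) s hlen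

theorem whileB_eq (m : Nat) (e : List (Int × Int))
    (he : ∀ p ∈ e, PySem.Raise.InRange m p.1 ∧ PySem.Raise.InRange m p.2) :
    ∀ (fuel : Nat) (vs : List Bool), vs.length = m →
      whileB e fuel vs = whileN (eNorm m e) fuel vs := by
  intro fuel
  induction fuel with
  | zero => intro vs _; rfl
  | succ f ihf =>
      intro vs hlen
      show (let s := sweepB e (vs, false); if s.2 then whileB e f s.1 else s.1)
        = (let s := sweepN (eNorm m e) (vs, false); if s.2 then whileN (eNorm m e) f s.1 else s.1)
      rw [show sweepB e (vs, false) = sweepN (eNorm m e) (vs, false) from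
        sweepB_eq m e he (vs, false) hlen]
      by_cases hc : (sweepN (eNorm m e) (vs, false)).2 = true
      · simp only [hc, if_pos]
        exact ihf _ (by rw [sweepN_length]; exact hlen)
      · simp only [Bool.not_eq_true] at hc
        simp only [hc]
        rfl

-- ---------- initial state and the final comparison ----------
theorem vf_replicate (m u : Nat) : vf (List.replicate m false) u = false := by
  unfold vf
  rw [List.getD, List.getElem?_replicate]
  split <;> rfl

theorem cF_replicate (m : Nat) : cF (List.replicate m false) = m := by
  unfold cF
  rw [List.length_replicate, List.filter_eq_self.mpr, List.length_range]
  intro u _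
  simp [vf_replicate]

theorem whileN_length (eN : List (Nat × Nat)) :
    ∀ (fuel : Nat) (vs : List Bool), (whileN eN fuel vs).length = vs.length := by
  intro fuel
  induction fuel with
  | zero => intro vs; rfl
  | succ f ihf =>
      intro vs
      show (if (sweepN eN (vs, false)).2 then whileN eN f (sweepN eN (vs, false)).1
          else (sweepN eN (vs, false)).1).length = _
      by_cases h : (sweepN eN (vs, false)).2 = true
      · rw [if_pos h, ihf, sweepN_length]
      · rw [if_neg h, sweepN_length]

theorem bool_eq_of_iff {a b : Bool} (h : a = true ↔ b = true) : a = b := by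
  cases a <;> cases b <;> simp_all

theorem adj_same (m : Nat) (e : List (Int × Int))
    (he : ∀ p ∈ e, PySem.Raise.InRange m p.1 ∧ PySem.Raise.InRange m p.2)
    (g : List (List Int))
    (hgdef : g = e.foldl (fun g uv =>
        let g1 := PySem.List.pySetD g uv.1 (PySem.List.pyGetD g uv.1 [] ++ [uv.2])
        PySem.List.pySetD g1 uv.2 (PySem.List.pyGetD g1 uv.2 [] ++ [uv.1]))
        (List.replicate m []))
    (hglen : g.length = m) :
    ∀ a w, w ∈ adjn g a ↔ w ∈ adjR (eNorm m e) a := by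
  intro a w
  have hmemg : ∀ i : Int, i ∈ g.getD a [] ↔
      ∃ p ∈ e, (nrm m p.1 = a ∧ i = p.2) ∨ (nrm m p.2 = a ∧ i = p.1) := by
    intro i
    rw [hgdef]
    rw [build_mem m e (List.replicate m []) List.length_replicate he a i]
    constructor
    · rintro (h | h)
      · exfalso
        rw [List.getD_eq_getElem?_getD] at h
        rcases hh : (List.replicate m ([] : List Int))[a]? with _ | l
        · rw [hh] at h; cases h
        · rw [hh] at h
          have := List.eq_of_mem_replicate (List.mem_of_getElem? hh)
          rw [this] at h
          cases h
      · exact h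
    · intro h
      exact Or.inr h
  unfold adjn
  rw [List.mem_map, mem_adjR]
  constructor
  · rintro ⟨i, hi, rfl⟩
    rcases (hmemg i).mp hi with ⟨p, hp, ⟨h1, h2⟩ | ⟨h1, h2⟩⟩
    · refine ⟨(nrm m p.1, nrm m p.2), List.mem_map.mpr ⟨p, hp, rfl⟩, Or.inl ⟨h1, ?_⟩⟩
      rw [h2, hglen]
    · refine ⟨(nrm m p.1, nrm m p.2), List.mem_map.mpr ⟨p, hp, rfl⟩, Or.inr ⟨h1, ?_⟩⟩
      rw [h2, hglen]
  · rintro ⟨q, hq, hor⟩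
    rcases List.mem_map.mp hq with ⟨p, hp, rfl⟩
    rcases hor with ⟨h1, h2⟩ | ⟨h1, h2⟩
    · exact ⟨p.2, (hmemg p.2).mpr ⟨p, hp, Or.inl ⟨h1, rfl⟩⟩, by rw [hglen]; exact h2⟩
    · exact ⟨p.1, (hmemg p.1).mpr ⟨p, hp, Or.inr ⟨h1, rfl⟩⟩, by rw [hglen]; exact h2⟩

-- ===== VERDICT (by name: the statement is the Claim_ definition above) =====
theorem tplt_spec : Claim_equal_tplt := by
  intro n e x _ hPre
  rcases hPre with ⟨hx, he⟩
  set m := (n + 1).toNat with hm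
  have hm0 : 0 < m := pos_of_inRange hx
  have hbuild := build_inv m e (List.replicate m [])
    (List.length_replicate) he
    (by
      intro l hl i hi
      rw [List.eq_of_mem_replicate hl] at hi
      cases hi)
  show tplt n e x = tplt_alt n e x
  unfold tplt tplt_alt
  set g := e.foldl (fun g uv =>
      let g1 := PySem.List.pySetD g uv.1 (PySem.List.pyGetD g uv.1 [] ++ [uv.2])
      PySem.List.pySetD g1 uv.2 (PySem.List.pyGetD g1 uv.2 [] ++ [uv.1]))
      (List.replicate m []) with hgdef
  have hglen : g.length = m := hbuild.1
  have hg' : ∀ l ∈ g, ∀ i ∈ l, PySem.Raise.InRange g.length i := by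
    rw [hglen]; exact hbuild.2
  have hx' : PySem.Raise.InRange g.length x := by rw [hglen]; exact hx
  have hnx : nrm m x < m := nrm_lt hx
  have hnxg : nrm g.length x = nrm m x := by rw [hglen]
  set vs0 : List Bool := List.replicate m false with hvs0
  have hvs0len : vs0.length = g.length := by rw [hvs0, List.length_replicate, hglen]
  -- A side
  have hAeq := dfsA_eq g hg' m x vs0 hvs0len hx'
  have hcf0 : cF vs0 = m := cF_replicate m
  have hadjbound : ∀ a w, w ∈ adjn g a → w < vs0.length := by
    intro a w hw
    rw [hvs0, List.length_replicate, ← hglen]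
    rcases List.mem_map.mp hw with ⟨i, hi, rfl⟩
    by_cases ha : a < g.length
    · have : g.getD a [] ∈ g := by
        rw [List.getD_eq_getElem?_getD, List.getElem?_eq_getElem ha]
        exact List.getElem_mem ha
      exact nrm_lt (hg' _ this i hi)
    · rw [List.getD_eq_default _ _ (by omega)] at hi
      cases hi
  have charA := dfsN_char (adjn g) m vs0 (nrm m x) m
    (by omega) (by omega) hadjbound
    (by rw [hvs0, List.length_replicate]; exact hnx) (vf_replicate _ _)
  -- B side
  have hvs1 : PySem.List.pySetD vs0 x true = vs0.set (nrm m x) true := by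
    have := pySetD_nrm vs0 x true (by rw [hvs0, List.length_replicate]; exact hx)
    rw [this, hvs0, List.length_replicate]
  have hvs1len : (vs0.set (nrm m x) true).length = m := by
    rw [List.length_set, hvs0, List.length_replicate]
  have hcf1 : cF (vs0.set (nrm m x) true) < m + 1 := by
    have := cF_set (a := nrm m x) (vs := vs0)
      (by rw [hvs0, List.length_replicate]; exact hnx) (vf_replicate _ _)
    omega
  have heEbound : ∀ p ∈ eNorm m e, p.1 < (vs0.set (nrm m x) true).length
      ∧ p.2 < (vs0.set (nrm m x) true).length := by
    intro p hp
    rcases List.mem_map.mp hp with ⟨q, hq, rfl⟩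
    rcases he q hq with ⟨hq1, hq2⟩
    rw [hvs1len]
    exact ⟨nrm_lt hq1, nrm_lt hq2⟩
  have hBeq := whileB_eq m e he (m + 1) (vs0.set (nrm m x) true) hvs1len
  have charB := whileN_char (eNorm m e) (m + 1) (vs0.set (nrm m x) true)
    heEbound hcf1
  have hadjsame := adj_same m e he g hgdef hglen
  -- pointwise equality of the two final visited vectors
  have hpointwise : ∀ u, vf (dfsA g m x vs0) u
      = vf (whileB e (m + 1) (PySem.List.pySetD vs0 x true)) u := by
    intro u
    rw [hAeq, hnxg, hvs1, hBeq]
    apply bool_eq_of_iff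
    rw [charA u, charB u]
    simp only [hvs0, vf_replicate]
    constructor
    · rintro (h | h)
      · cases h
      · refine ⟨nrm m x, (vf_set_true _ _ _).mpr (Or.inl ⟨rfl, ?_⟩), ?_⟩
        · rw [List.length_replicate]; exact hnx
        · exact reach_congr hadjsame (fun w => vf_replicate m w) h
    · rintro ⟨j, hj, hr⟩
      rcases (vf_set_true _ _ _).mp hj with ⟨rfl, _⟩ | hj'
      · exact Or.inr (reach_congr (fun a w => (hadjsame a w).symm)
          (fun w => (vf_replicate m w).symm) hr)
      · rw [vf_replicate] at hj'; cases hj'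
  have hAlen : (dfsA g m x vs0).length = m := by
    rw [hAeq, dfsN_length, hvs0, List.length_replicate]
  have hBlen : (whileB e (m + 1) (PySem.List.pySetD vs0 x true)).length = m := by
    rw [hvs1, hBeq, whileN_length, hvs1len]
  apply List.filter_congr
  intro i hi
  rcases (PySem.List.mem_pyRange_one).mp hi with ⟨hi1, hi2⟩
  have hiR : PySem.Raise.InRange m i := by
    unfold PySem.Raise.InRange
    constructor
    · omega
    · omega
  congr 1
  rw [pyGetD_nrm _ i false (by rw [hAlen]; exact hiR),
    pyGetD_nrm _ i false (by rw [hBlen]; exact hiR), hAlen, hBlen]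
  exact hpointwise (nrm m i)
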